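-- pv_equiv track=rewrite | github.com/DGaffney/chatdemo | backend/knowledge/documents/chunker.py | _window_words
-- ===== SOURCE A (Python) =====
-- TARGET_WORDS = 500
--
-- def _window_words(text: str) -> list[str]:
--     """Slice a long run-on paragraph into TARGET_WORDS-sized windows."""
--     words = text.split()
--     if not words:
--         return []
--     out: list[str] = []
--     for start in range(0, len(words), TARGET_WORDS):
--         out.append(" ".join(words[start : start + TARGET_WORDS]))
--     return out
-- ===== SOURCE B (Python) =====
-- TARGET_WORDS = 500
--
-- def _window_words(text: str) -> list[str]:
--     """One pass over the words: accumulate into a buffer, flush when full."""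
--     out: list[str] = []
--     buffer: list[str] = []
--     for word in text.split():
--         buffer.append(word)
--         if len(buffer) == TARGET_WORDS:
--             out.append(" ".join(buffer))
--             buffer = []
--     if buffer:
--         out.append(" ".join(buffer))
--     return out
-- ===== Notes on version B (the rewrite author's own statement) =====
-- stated objective: alternative
-- what changed: Replaced the range-stride slicing loop (slice out words[start:start+500] per window) by a single incremental pass that appends words to a buffer and flushes it to the output whenever it fills, with a final flush for the remainder.
import Mathlib
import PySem

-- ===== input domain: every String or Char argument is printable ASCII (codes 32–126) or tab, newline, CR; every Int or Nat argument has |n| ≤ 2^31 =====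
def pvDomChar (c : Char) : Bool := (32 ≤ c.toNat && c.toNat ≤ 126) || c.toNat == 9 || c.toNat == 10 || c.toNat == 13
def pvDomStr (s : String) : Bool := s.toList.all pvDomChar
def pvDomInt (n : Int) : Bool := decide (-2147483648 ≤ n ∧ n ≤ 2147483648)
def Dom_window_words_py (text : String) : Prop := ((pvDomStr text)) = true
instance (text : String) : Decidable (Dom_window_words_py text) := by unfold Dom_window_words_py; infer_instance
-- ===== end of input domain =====

-- B replaces A's range-stride slicing by a one-pass buffer that flushes when full (alternative decomposition, same cost).

-- ===== PORT A =====
-- literal port of A: split, early return on empty, loop over range(0, len, 500) slicing out each window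
def window_words_py (text : String) : List String :=
  let words := PySem.Str.split₀ text
  if words = [] then []
  else
    (PySem.List.pyRange 0 (words.length : Int) 500).foldl
      (fun out start => out ++ [PySem.Str.join " " (PySem.List.slice words (some start) (some (start + 500)))]) []

-- ===== PORT B =====
-- literal port of B: fold over the words with (out, buffer); flush buffer at length 500; final flush if non-empty
def window_words_py_alt (text : String) : List String :=
  let st := (PySem.Str.split₀ text).foldl
    (fun (st : List String × List String) word =>
      let buffer := st.2 ++ [word]
      if buffer.length = 500 then (st.1 ++ [PySem.Str.join " " buffer], []) else (st.1, buffer))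
    ([], [])
  if st.2 = [] then st.1 else st.1 ++ [PySem.Str.join " " st.2]

-- ===== PRECONDITION & SPEC =====
def Spec_window_words_py (text : String) (out : List String) : Prop := out = window_words_py_alt text
instance (text : String) (out : List String) : Decidable (Spec_window_words_py text out) := by unfold Spec_window_words_py; infer_instance

-- ===== CLAIM (what is proved, stated in full; the proofs are below) =====
def Claim_equal_window_words_py : Prop := ∀ (text : String), Dom_window_words_py text → Spec_window_words_py text (window_words_py text)

-- ===== LEMMAS AND PROOFS =====

-- canonical chunking both ports are proved equal to
def pvChunks (ws : List String) : List String :=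
  if h : ws = [] then []
  else PySem.Str.join " " (ws.take 500) :: pvChunks (ws.drop 500)
termination_by ws.length
decreasing_by
  simp only [List.length_drop]
  have : 0 < ws.length := List.length_pos_iff.mpr h
  omega

theorem pvChunks_nil : pvChunks [] = [] := by rw [pvChunks]; simp

theorem pvChunks_of_ne (ws : List String) (h : ws ≠ []) :
    pvChunks ws = PySem.Str.join " " (ws.take 500) :: pvChunks (ws.drop 500) := by
  rw [pvChunks]; simp [h]

theorem pyRange_cons_of_pos (a b s : Int) (hs : 0 < s) (hab : a < b) :
    PySem.List.pyRange a b s = a :: PySem.List.pyRange (a + s) b s := by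
  rw [PySem.List.pyRange_of_pos _ _ hs, PySem.List.pyRange_of_pos _ _ hs]
  have hs0 : s ≠ 0 := by omega
  have hd1 : (b - a + s - 1) / s = (b - a - 1) / s + 1 := by
    have h1 : b - a + s - 1 = (b - a - 1) + 1 * s := by ring
    rw [h1, Int.add_mul_ediv_right _ _ hs0]
  have hq : 0 ≤ (b - a - 1) / s := Int.ediv_nonneg (by omega) (by omega)
  have hnum : b - (a + s) + s - 1 = b - a - 1 := by ring
  have hn : ((b - a + s - 1) / s).toNat
      = (if a + s < b then ((b - (a + s) + s - 1) / s).toNat else 0) + 1 := by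
    by_cases hb : a + s < b
    · simp only [hb, if_pos, hnum]
      rw [hd1]; omega
    · have hz : (b - a - 1) / s = 0 := Int.ediv_eq_zero_of_lt (by omega) (by omega)
      simp only [hb, if_false]
      rw [hd1, hz]
      rfl
  simp only [if_pos hab]
  rw [hn, List.range_succ_eq_map, List.map_cons, List.map_map]
  refine List.cons_eq_cons.mpr ⟨by push_cast; ring, ?_⟩
  apply List.map_congr_left
  intro k _
  simp only [Function.comp_apply, Nat.succ_eq_add_one]
  push_cast
  ring

theorem lemA (n : Nat) : ∀ (ws : List String) (j : Nat) (out : List String), ws.length - j = n →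
    (PySem.List.pyRange (j : Int) (ws.length : Int) 500).foldl
      (fun out start => out ++ [PySem.Str.join " " (PySem.List.slice ws (some start) (some (start + 500)))]) out
    = out ++ pvChunks (ws.drop j) := by
  induction n using Nat.strong_induction_on with
  | _ n ih =>
    intro ws j out hn
    by_cases hj : j < ws.length
    · have hcons := pyRange_cons_of_pos (j : Int) (ws.length : Int) 500 (by omega) (by exact_mod_cast hj)
      rw [hcons]
      simp only [List.foldl_cons]
      have hsl : PySem.List.slice ws (some (j : Int)) (some ((j : Int) + 500)) = (ws.drop j).take 500 := by
        have := PySem.List.slice_natCast_add ws j 500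
        push_cast at this ⊢
        rw [this]
      have hcast : ((j : Int) + 500) = ((j + 500 : Nat) : Int) := by push_cast; ring
      rw [hsl, hcast,
        ih (ws.length - (j + 500)) (by omega) ws (j + 500) _ rfl]
      rw [pvChunks_of_ne (ws.drop j) (by simp; omega)]
      have hdd : (ws.drop j).drop 500 = ws.drop (j + 500) := by
        rw [List.drop_drop, Nat.add_comm]
      simp [hdd]
    · have hnil : PySem.List.pyRange (j : Int) (ws.length : Int) 500 = [] := by
        rw [PySem.List.pyRange_of_pos _ _ (by omega : (0:Int) < 500)]
        simp only [if_neg (show ¬((j:Int) < (ws.length:Int)) by exact_mod_cast hj)]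
        simp
      rw [hnil]
      simp [List.drop_eq_nil_of_le (by omega : ws.length ≤ j), pvChunks_nil]

theorem lemB (ws : List String) : ∀ (out buf : List String), buf.length < 500 →
    (let st := ws.foldl
      (fun (st : List String × List String) word =>
        let buffer := st.2 ++ [word]
        if buffer.length = 500 then (st.1 ++ [PySem.Str.join " " buffer], []) else (st.1, buffer))
      (out, buf);
     if st.2 = [] then st.1 else st.1 ++ [PySem.Str.join " " st.2])
    = out ++ pvChunks (buf ++ ws) := by
  induction ws with
  | nil =>
    intro out buf hb
    by_cases h : buf = []
    · simp [h, pvChunks_nil]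
    · simp only [List.foldl_nil, List.append_nil]
      rw [pvChunks_of_ne buf h]
      have ht : buf.take 500 = buf := List.take_of_length_le (by omega)
      have hd : buf.drop 500 = [] := List.drop_eq_nil_of_le (by omega)
      simp [h, ht, hd, pvChunks_nil]
  | cons w ws ihw =>
    intro out buf hb
    simp only [List.foldl_cons]
    by_cases hfull : (buf ++ [w]).length = 500
    · simp only [hfull, if_pos]
      rw [ihw (out ++ [PySem.Str.join " " (buf ++ [w])]) [] (by simp)]
      rw [pvChunks_of_ne (buf ++ w :: ws) (by simp)]
      have hbw : buf ++ w :: ws = (buf ++ [w]) ++ ws := by simp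
      have hlen : (buf ++ [w]).length = 500 := hfull
      rw [hbw, List.take_append_of_le_length (by omega), List.drop_append_of_le_length (by omega)]
      have ht : (buf ++ [w]).take 500 = buf ++ [w] := List.take_of_length_le (by omega)
      have hdrop : (buf ++ [w]).drop 500 = [] := List.drop_eq_nil_of_le (by omega)
      simp [ht, hdrop]
    · simp only [hfull, if_false]
      rw [ihw out (buf ++ [w]) (by simp at hfull ⊢; omega)]
      simp

-- ===== VERDICT (by name: the statement is the Claim_ definition above) =====
theorem window_words_py_spec : Claim_equal_window_words_py := by
  intro text _
  unfold Spec_window_words_py window_words_py window_words_py_alt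
  simp only []
  have hB := lemB (PySem.Str.split₀ text) [] [] (by simp)
  simp only [List.nil_append] at hB
  rw [hB]
  by_cases h : PySem.Str.split₀ text = []
  · simp [h, pvChunks_nil]
  · simp only [h, if_false]
    have hA := lemA (PySem.Str.split₀ text).length (PySem.Str.split₀ text) 0 [] (by omega)
    simp only [Nat.cast_zero, List.drop_zero, List.nil_append] at hA
    exact hA
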